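-- pv_equiv track=rewrite | github.com/amusci/escapingTutorialHell | pyt/carBuilder.py | cars
-- ===== SOURCE A (Python) =====
-- def cars(wheels, bodies, figures):
--     ans = 0
--     if wheels < 4 or bodies < 1 or figures < 2:
--         return 0
--     else:
--         while wheels >= 4 and bodies >= 1 and figures >= 2:
--             ans += 1
--             wheels -= 4
--             bodies -= 1
--             figures -= 2
--         return ans
-- ===== SOURCE B (Python) =====
-- def cars(wheels, bodies, figures):
--     return max(0, min(wheels // 4, bodies, figures // 2))
-- ===== Notes on version B (the rewrite author's own statement) =====
-- stated objective: faster
-- what changed: Replaces the subtract-in-a-loop counting with the closed form max(0, min(wheels // 4, bodies, figures // 2)).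
import Mathlib
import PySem

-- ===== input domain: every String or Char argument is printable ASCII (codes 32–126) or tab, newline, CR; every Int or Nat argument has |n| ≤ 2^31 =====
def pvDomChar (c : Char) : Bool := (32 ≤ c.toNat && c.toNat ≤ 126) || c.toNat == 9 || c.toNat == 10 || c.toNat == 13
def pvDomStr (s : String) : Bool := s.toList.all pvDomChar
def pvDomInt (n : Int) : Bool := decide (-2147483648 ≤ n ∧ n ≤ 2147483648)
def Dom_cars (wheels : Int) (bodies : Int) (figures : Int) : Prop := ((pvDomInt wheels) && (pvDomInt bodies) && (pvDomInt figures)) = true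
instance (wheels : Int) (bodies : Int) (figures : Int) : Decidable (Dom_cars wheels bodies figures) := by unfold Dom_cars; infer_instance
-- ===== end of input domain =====

-- B replaces A's subtract-and-count loop by the closed form max(0, min(wheels//4, bodies, figures//2)); objective: faster (O(1) vs O(answer)).

-- ===== PORT A =====
-- the while loop of A, carrying the mutated (wheels, bodies, figures, ans)
def carsLoop (wheels bodies figures ans : Int) : Int :=
  if h : wheels ≥ 4 ∧ bodies ≥ 1 ∧ figures ≥ 2 then
    carsLoop (wheels - 4) (bodies - 1) (figures - 2) (ans + 1)
  else
    ans
termination_by figures.toNat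
decreasing_by omega

def cars (wheels : Int) (bodies : Int) (figures : Int) : Int :=
  if wheels < 4 ∨ bodies < 1 ∨ figures < 2 then 0
  else carsLoop wheels bodies figures 0

-- ===== PORT B =====
def cars_alt (wheels : Int) (bodies : Int) (figures : Int) : Int :=
  max 0 (min (PySem.Int.floordiv wheels 4) (min bodies (PySem.Int.floordiv figures 2)))

-- ===== PRECONDITION & SPEC =====
def Spec_cars (wheels : Int) (bodies : Int) (figures : Int) (out : Int) : Prop := out = cars_alt wheels bodies figures
instance (wheels : Int) (bodies : Int) (figures : Int) (out : Int) : Decidable (Spec_cars wheels bodies figures out) := by unfold Spec_cars; infer_instance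

-- ===== CLAIM (what is proved, stated in full; the proofs are below) =====
def Claim_equal_cars : Prop := ∀ (wheels : Int) (bodies : Int) (figures : Int), Dom_cars wheels bodies figures → Spec_cars wheels bodies figures (cars wheels bodies figures)

-- ===== LEMMAS AND PROOFS =====

-- invariant of A's loop: it adds exactly min(wheels//4, bodies, figures//2) (clamped at 0) to ans
theorem carsLoop_closed (n : Nat) : ∀ (w b f a : Int), f.toNat ≤ n →
    carsLoop w b f a = a + max 0 (min (w / 4) (min b (f / 2))) := by
  induction n with
  | zero =>
    intro w b f a hf
    rw [carsLoop]
    split_ifs with h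
    · omega
    · omega
  | succ n ih =>
    intro w b f a hf
    rw [carsLoop]
    split_ifs with h
    · rw [ih (w - 4) (b - 1) (f - 2) (a + 1) (by omega)]
      omega
    · omega

-- ===== VERDICT (by name: the statement is the Claim_ definition above) =====
theorem cars_spec : Claim_equal_cars := by
  intro w b f _
  unfold Spec_cars cars cars_alt
  rw [PySem.Int.floordiv_eq_ediv_of_pos (by omega), PySem.Int.floordiv_eq_ediv_of_pos (by omega)]
  split_ifs with h
  · omega
  · rw [carsLoop_closed f.toNat w b f 0 (le_refl _)]
    omega
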